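-- pv_equiv track=rewrite | github.com/Airysm/algorithm | 프로그래머스/2/42584. 주식가격/주식가격.py | solution
-- ===== SOURCE A (Python) =====
-- def solution(prices):
--     flag = True
--     answer = []
--
--     for i in range(len(prices)):
--         sec = -1
--         for j in range(i, len(prices)):
--             sec += 1
--             if prices[i] > prices[j]:
--                 answer.append(sec)
--                 flag = False
--                 break
--         if flag:
--             answer.append(sec)
--         else:
--             flag = True
--
--     return answer
-- ===== SOURCE B (Python) =====
-- def solution(prices):
--     n = len(prices)
--     answer = [0] * n
--     stack = []  # indices with no drop seen yet; prices non-decreasing bottom-to-top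
--     for i in range(n):
--         while stack and prices[stack[-1]] > prices[i]:
--             j = stack.pop()
--             answer[j] = i - j
--         stack.append(i)
--     for j in stack:
--         answer[j] = n - 1 - j
--     return answer
-- ===== Notes on version B (the rewrite author's own statement) =====
-- stated objective: faster
-- what changed: Replaced A's per-index rescan of the remaining suffix (nested loops with a break flag) by a single left-to-right pass with a monotonic stack of pending indices, assigning each duration when its first lower price appears and back-filling the survivors at the end.
import Mathlib
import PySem

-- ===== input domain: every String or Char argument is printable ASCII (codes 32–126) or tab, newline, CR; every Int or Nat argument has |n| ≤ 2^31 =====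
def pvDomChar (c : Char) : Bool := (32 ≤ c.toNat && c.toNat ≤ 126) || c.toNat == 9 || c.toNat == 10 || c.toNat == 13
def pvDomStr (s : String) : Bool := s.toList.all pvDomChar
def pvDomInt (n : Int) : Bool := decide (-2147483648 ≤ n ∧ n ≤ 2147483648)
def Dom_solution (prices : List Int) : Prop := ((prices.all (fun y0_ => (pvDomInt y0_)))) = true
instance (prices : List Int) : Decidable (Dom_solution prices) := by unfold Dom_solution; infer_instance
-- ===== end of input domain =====

-- B replaces A's O(n^2) rescan-per-index with a single-pass monotonic stack (O(n)); return values are identical.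

-- ===== PORT A =====
-- inner loop 'for j in range(i, n): sec += 1; if prices[i] > prices[j]: …break'
-- (indices from range(i, len(prices)) are always valid and non-negative, so List.getD is exact here)
def solInner (prices : List Int) (i : Nat) : Int → List Nat → Int × Bool
  | sec, [] => (sec, false)
  | sec, j :: js =>
    let sec := sec + 1
    if prices.getD i 0 > prices.getD j 0 then (sec, true)
    else solInner prices i sec js

-- one iteration of the outer loop, carrying (flag, answer)
def solStep (prices : List Int) (st : Bool × List Int) (i : Nat) : Bool × List Int :=
  let r := solInner prices i (-1) (List.range' i (prices.length - i))
  let st' := if r.2 then (false, st.2 ++ [r.1]) else (st.1, st.2)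
  if st'.1 then (st'.1, st'.2 ++ [r.1]) else (true, st'.2)

def solution (prices : List Int) : List Int :=
  ((List.range prices.length).foldl (solStep prices) (true, [])).2

-- ===== PORT B =====
-- 'while stack and prices[stack[-1]] > prices[i]: j = stack.pop(); answer[j] = i - j'
-- (stack is held top-first: Lean head = Python stack[-1]; answer[j] = v with 0 ≤ j < len is List.set)
def altPop (prices : List Int) (i : Nat) : List Int → List Nat → List Int × List Nat
  | ans, [] => (ans, [])
  | ans, j :: st =>
    if prices.getD j 0 > prices.getD i 0 then
      altPop prices i (ans.set j ((i : Int) - (j : Int))) st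
    else (ans, j :: st)

def altStep (prices : List Int) (st : List Int × List Nat) (i : Nat) : List Int × List Nat :=
  let r := altPop prices i st.1 st.2
  (r.1, i :: r.2)

def solution_alt (prices : List Int) : List Int :=
  let n := prices.length
  let r := (List.range n).foldl (altStep prices) (List.replicate n 0, [])
  -- Python's final 'for j in stack' runs bottom-to-top, i.e. over the reverse of the top-first list
  r.2.reverse.foldl (fun ans j => ans.set j ((n : Int) - 1 - (j : Int))) r.1

-- ===== PRECONDITION & SPEC =====
def Spec_solution (prices : List Int) (out : List Int) : Prop := out = solution_alt prices
instance (prices : List Int) (out : List Int) : Decidable (Spec_solution prices out) := by unfold Spec_solution; infer_instance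

-- ===== CLAIM (what is proved, stated in full; the proofs are below) =====
def Claim_equal_solution : Prop := ∀ (prices : List Int), Dom_solution prices → Spec_solution prices (solution prices)

-- ===== LEMMAS AND PROOFS =====

-- seconds until the first strictly smaller element of l, counting that element; l's length if none
def cntDrop (x : Int) : List Int → Int
  | [] => 0
  | h :: t => if h < x then 1 else 1 + cntDrop x t

def specAns (p : List Int) (i : Nat) : Int := cntDrop (p.getD i 0) (p.drop (i + 1))

theorem solInner_cons (p : List Int) (i j : Nat) (sec : Int) (js : List Nat) :
    solInner p i sec (j :: js) =
      if p.getD i 0 > p.getD j 0 then (sec + 1, true) else solInner p i (sec + 1) js := rfl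

theorem cntDrop_cons (x h : Int) (t : List Int) :
    cntDrop x (h :: t) = if h < x then 1 else 1 + cntDrop x t := rfl

theorem getD_set_self (l : List Int) (j : Nat) (v : Int) (h : j < l.length) :
    (l.set j v).getD j 0 = v := by
  simp [List.getD, h]

theorem getD_set_ne (l : List Int) (j k : Nat) (v : Int) (h : k ≠ j) :
    (l.set j v).getD k 0 = l.getD k 0 := by
  simp [List.getD, List.getElem?_set_ne (Ne.symm h)]

theorem drop_cons_getD (p : List Int) (i : Nat) (hi : i < p.length) :
    p.drop i = p.getD i 0 :: p.drop (i + 1) := by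
  rw [List.getD_eq_getElem p 0 hi]
  exact List.drop_eq_getElem_cons hi

theorem cntDrop_no_drop (x : Int) : ∀ l : List Int, (∀ z ∈ l, ¬ z < x) → cntDrop x l = l.length := by
  intro l
  induction l with
  | nil => intro _; simp [cntDrop]
  | cons h t ih =>
    intro hz
    have hh : ¬ h < x := hz h (by simp)
    rw [cntDrop_cons, if_neg hh, ih (fun z hzt => hz z (by simp [hzt]))]
    simp
    ring

theorem cntDrop_append_no (x : Int) : ∀ l1 l2 : List Int, (∀ z ∈ l1, ¬ z < x) →
    cntDrop x (l1 ++ l2) = l1.length + cntDrop x l2 := by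
  intro l1
  induction l1 with
  | nil => intro l2 _; simp
  | cons h t ih =>
    intro l2 hz
    have hh : ¬ h < x := hz h (by simp)
    rw [List.cons_append, cntDrop_cons, if_neg hh, ih l2 (fun z hzt => hz z (by simp [hzt]))]
    simp
    ring

-- elements strictly between positions j and i are exactly what the take of the drop holds
theorem mem_take_drop (p : List Int) (j i : Nat) (z : Int)
    (hz : z ∈ (p.drop (j+1)).take (i - (j+1))) :
    ∃ k, j < k ∧ k < i ∧ k < p.length ∧ z = p.getD k 0 := by
  obtain ⟨m, hm, heq⟩ := List.getElem_of_mem hz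
  have hm' : m < i - (j+1) ∧ m < p.length - (j+1) := by
    simpa [List.length_take] using hm
  have hk : j + 1 + m < p.length := by omega
  refine ⟨j + 1 + m, by omega, by omega, hk, ?_⟩
  rw [List.getD_eq_getElem p 0 hk, ← heq, List.getElem_take, List.getElem_drop]

theorem spec_pop (p : List Int) (j i : Nat) (hji : j < i) (hi : i < p.length)
    (hdrop : p.getD i 0 < p.getD j 0)
    (hS2 : ∀ k, j < k → k < i → p.getD j 0 ≤ p.getD k 0) :
    specAns p j = (i : Int) - (j : Int) := by
  have hdecomp : p.drop (j+1) = (p.drop (j+1)).take (i - (j+1)) ++ p.drop i := by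
    conv_lhs => rw [← List.take_append_drop (i - (j+1)) (p.drop (j+1))]
    rw [List.drop_drop]
    congr 2
    omega
  have hlen : ((p.drop (j+1)).take (i - (j+1))).length = i - (j+1) := by
    simp [List.length_take]
    omega
  have hno : ∀ z ∈ (p.drop (j+1)).take (i - (j+1)), ¬ z < p.getD j 0 := by
    intro z hz
    obtain ⟨k, hk1, hk2, _, hzk⟩ := mem_take_drop p j i z hz
    subst hzk
    exact not_lt.mpr (hS2 k hk1 hk2)
  rw [specAns, hdecomp, cntDrop_append_no _ _ _ hno, drop_cons_getD p i hi,
    cntDrop_cons, if_pos hdrop, hlen]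
  omega

theorem spec_end (p : List Int) (j : Nat) (hj : j < p.length)
    (hS2 : ∀ k, j < k → k < p.length → p.getD j 0 ≤ p.getD k 0) :
    specAns p j = (p.length : Int) - 1 - (j : Int) := by
  have hno : ∀ z ∈ p.drop (j+1), ¬ z < p.getD j 0 := by
    intro z hz
    obtain ⟨m, hm, heq⟩ := List.getElem_of_mem hz
    have hm' : j + 1 + m < p.length := by
      have := hm; simp at this; omega
    have hzd : z = p.getD (j+1+m) 0 := by
      rw [List.getD_eq_getElem p 0 hm', ← heq, List.getElem_drop]
    subst hzd
    exact not_lt.mpr (hS2 (j+1+m) (by omega) hm')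
  rw [specAns, cntDrop_no_drop _ _ hno]
  simp
  omega

-- ---------- A computes specAns pointwise ----------

theorem solInner_fst (p : List Int) (i : Nat) :
    ∀ a sec, a ≤ p.length →
    (solInner p i sec (List.range' a (p.length - a))).1 = sec + cntDrop (p.getD i 0) (p.drop a) := by
  intro a
  induction' hn : p.length - a with m ih generalizing a
  · intro sec ha
    have hd : p.drop a = [] := List.drop_eq_nil_of_le (by omega)
    simp [hd, solInner, cntDrop]
  · intro sec ha
    have halt : a < p.length := by omega
    rw [List.range'_succ, solInner_cons, drop_cons_getD p a halt, cntDrop_cons]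
    by_cases hc : p.getD a 0 < p.getD i 0
    · rw [if_pos hc, if_pos hc]
    · rw [if_neg hc, if_neg hc, ih (a + 1) (by omega) (sec + 1) (by omega)]
      ring

theorem solStep_true (p : List Int) (i : Nat) (hi : i < p.length) (acc : List Int) :
    solStep p (true, acc) i = (true, acc ++ [specAns p i]) := by
  have h1 : (solInner p i (-1) (List.range' i (p.length - i))).1 = specAns p i := by
    rw [solInner_fst p i i (-1) (le_of_lt hi), drop_cons_getD p i hi, cntDrop_cons,
      if_neg (lt_irrefl _), specAns]
    ring
  rcases hr : solInner p i (-1) (List.range' i (p.length - i)) with ⟨sec, found⟩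
  have hs : sec = specAns p i := by rw [← h1, hr]
  subst hs
  cases found <;> simp [solStep, hr]

theorem sol_fold (p : List Int) :
    ∀ (l : List Nat) (acc : List Int), (∀ i ∈ l, i < p.length) →
    l.foldl (solStep p) (true, acc) = (true, acc ++ l.map (specAns p)) := by
  intro l
  induction l with
  | nil => intro acc _; simp
  | cons i t ih =>
    intro acc h
    rw [List.foldl_cons, solStep_true p i (h i (by simp)) acc,
      ih _ (fun k hk => h k (by simp [hk]))]
    simp

theorem solution_eq_map (p : List Int) :
    solution p = (List.range p.length).map (specAns p) := by
  rw [solution, sol_fold p _ [] (fun i hi => List.mem_range.mp hi)]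
  simp

-- ---------- B computes specAns pointwise ----------

def InvB (p : List Int) (i : Nat) (ans : List Int) (stack : List Nat) : Prop :=
  ans.length = p.length ∧
  stack.Pairwise (fun a b => b < a) ∧
  (∀ j ∈ stack, j < i) ∧
  (∀ j ∈ stack, ∀ k, j < k → k < i → p.getD j 0 ≤ p.getD k 0) ∧
  (∀ j, j < i → j ∉ stack → ans.getD j 0 = specAns p j)

theorem altPop_spec (p : List Int) (i : Nat) (hi : i < p.length) :
    ∀ (stack : List Nat) (ans : List Int),
    ans.length = p.length →
    stack.Pairwise (fun a b => b < a) →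
    (∀ j ∈ stack, j < i) →
    (∀ j ∈ stack, ∀ k, j < k → k < i → p.getD j 0 ≤ p.getD k 0) →
    (∀ j, j < i → j ∉ stack → ans.getD j 0 = specAns p j) →
    (altPop p i ans stack).1.length = p.length ∧
    (altPop p i ans stack).2.Pairwise (fun a b => b < a) ∧
    (∀ j ∈ (altPop p i ans stack).2, j < i) ∧
    (∀ j ∈ (altPop p i ans stack).2, ∀ k, j < k → k < i → p.getD j 0 ≤ p.getD k 0) ∧
    (∀ j ∈ (altPop p i ans stack).2, p.getD j 0 ≤ p.getD i 0) ∧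
    (∀ j, j < i → j ∉ (altPop p i ans stack).2 → (altPop p i ans stack).1.getD j 0 = specAns p j) := by
  intro stack
  induction stack with
  | nil =>
    intro ans hlen _ _ _ hS3
    refine ⟨hlen, by simp [altPop], by simp [altPop], by simp [altPop], by simp [altPop], ?_⟩
    intro j hj _
    exact hS3 j hj (by simp)
  | cons j st ih =>
    intro ans hlen hpw hmem hS2 hS3
    have hji : j < i := hmem j (by simp)
    obtain ⟨hpwh, hpwt⟩ := List.pairwise_cons.mp hpw
    by_cases hc : p.getD i 0 < p.getD j 0
    · rw [show altPop p i ans (j :: st) = altPop p i (ans.set j ((i : Int) - (j : Int))) st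
        from by rw [altPop]; rw [if_pos hc]]
      apply ih
      · simpa using hlen
      · exact hpwt
      · exact fun k hk => hmem k (by simp [hk])
      · exact fun k hk => hS2 k (by simp [hk])
      · intro k hk hknot
        by_cases hkj : k = j
        · subst hkj
          rw [getD_set_self ans k _ (by omega)]
          exact (spec_pop p k i hji hi hc (hS2 k (by simp))).symm
        · rw [getD_set_ne ans j k _ hkj]
          exact hS3 k hk (by simp [hkj, hknot])
    · rw [show altPop p i ans (j :: st) = (ans, j :: st)
        from by rw [altPop]; rw [if_neg hc]]
      refine ⟨hlen, hpw, hmem, hS2, ?_, hS3⟩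
      intro m hm
      rcases List.mem_cons.mp hm with h | h
      · subst h; exact not_lt.mp hc
      · exact le_trans (hS2 m (by simp [h]) j (hpwh m h) hji) (not_lt.mp hc)

theorem foldB_inv (p : List Int) :
    ∀ i, i ≤ p.length →
    InvB p i ((List.range i).foldl (altStep p) (List.replicate p.length 0, [])).1
             ((List.range i).foldl (altStep p) (List.replicate p.length 0, [])).2 := by
  intro i
  induction i with
  | zero => intro _; refine ⟨by simp, by simp, by simp, by simp, by omega⟩
  | succ i ih =>
    intro hle
    have hi : i < p.length := by omega
    obtain ⟨hlen, hpw, hmem, hS2, hS3⟩ := ih (by omega)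
    rw [List.range_succ, List.foldl_append, List.foldl_cons, List.foldl_nil]
    set F := (List.range i).foldl (altStep p) (List.replicate p.length 0, []) with hF
    obtain ⟨q1, q2, q3, q4, q5, q6⟩ := altPop_spec p i hi F.2 F.1 hlen hpw hmem hS2 hS3
    refine ⟨q1, ?_, ?_, ?_, ?_⟩
    · exact List.pairwise_cons.mpr ⟨q3, q2⟩
    · intro j hj
      rcases List.mem_cons.mp hj with h | h
      · omega
      · have := q3 j h; omega
    · intro j hj k hjk hk
      rcases List.mem_cons.mp hj with h | h
      · subst h; omega
      · by_cases hki : k = i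
        · subst hki; exact q5 j h
        · exact q4 j h k hjk (by omega)
    · intro j hj hjnot
      have hjne : j ≠ i := fun h => hjnot (by simp [h, altStep])
      have hjnot' : j ∉ (altPop p i F.1 F.2).2 := fun h => hjnot (by simp [altStep, h])
      have := q6 j (by omega) hjnot'
      simpa [altStep] using this

theorem finalPass (p : List Int) :
    ∀ (st : List Nat) (ans : List Int),
    (∀ j ∈ st, j < p.length ∧ specAns p j = (p.length : Int) - 1 - (j : Int)) →
    ans.length = p.length →
    (∀ j, j < p.length → j ∉ st → ans.getD j 0 = specAns p j) →
    (st.foldl (fun a j => a.set j ((p.length : Int) - 1 - (j : Int))) ans).length = p.length ∧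
    ∀ j, j < p.length →
      (st.foldl (fun a j => a.set j ((p.length : Int) - 1 - (j : Int))) ans).getD j 0 = specAns p j := by
  intro st
  induction st with
  | nil =>
    intro ans _ hlen hS3
    exact ⟨hlen, fun j hj => hS3 j hj (by simp)⟩
  | cons h t ih =>
    intro ans hst hlen hS3
    rw [List.foldl_cons]
    apply ih
    · exact fun j hj => hst j (by simp [hj])
    · simpa using hlen
    · intro j hj hjt
      by_cases hjh : j = h
      · subst hjh
        rw [getD_set_self ans j _ (by rw [hlen]; exact (hst j (by simp)).1)]
        exact ((hst j (by simp)).2).symm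
      · rw [getD_set_ne ans h j _ hjh]
        exact hS3 j hj (by simp [hjh, hjt])

theorem solution_alt_eq_map (p : List Int) :
    solution_alt p = (List.range p.length).map (specAns p) := by
  obtain ⟨hlen, _, hmem, hS2, hS3⟩ := foldB_inv p p.length le_rfl
  set r := (List.range p.length).foldl (altStep p) (List.replicate p.length 0, []) with hr
  have hsa : solution_alt p =
      r.2.reverse.foldl (fun ans j => ans.set j ((p.length : Int) - 1 - (j : Int))) r.1 := by
    simp only [solution_alt, ← hr]
  obtain ⟨flen, fval⟩ := finalPass p r.2.reverse r.1
    (fun j hj => by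
      have hjm : j ∈ r.2 := List.mem_reverse.mp hj
      exact ⟨hmem j hjm, spec_end p j (hmem j hjm) (fun k hk1 hk2 => hS2 j hjm k hk1 hk2)⟩)
    hlen
    (fun j hj hjr => hS3 j hj (fun h => hjr (List.mem_reverse.mpr h)))
  rw [hsa]
  apply List.ext_getElem
  · rw [flen]; simp
  · intro j h1 h2
    have hj : j < p.length := by simpa using h2
    have hv := fval j hj
    rw [List.getD_eq_getElem _ 0 (by rw [flen]; exact hj)] at hv
    rw [hv]
    simp

-- ===== VERDICT (by name: the statement is the Claim_ definition above) =====
theorem solution_spec : Claim_equal_solution := by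
  intro p _
  unfold Spec_solution
  rw [solution_eq_map, solution_alt_eq_map]
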